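-- pv_equiv track=rewrite | github.com/z1chh/Challenges | src/Tech Questions/Unity/graph.py | solution
-- ===== SOURCE A (Python) =====
-- def solution(N, A, B):
--     graph = {}
--     for v1, v2 in zip(A, B):
--         if v1 < v2:
--             if v1 in graph:
--                 graph[v1].append(v2)
--             else:
--                 graph[v1] = [v2]
--         else:
--             if v2 in graph:
--                 graph[v2].append(v1)
--             else:
--                 graph[v2] = [v1]
--     for i in range(1, N):
--         if i not in graph:
--             return False
--         elif i + 1 not in graph[i]:
--             return False
--     return True
-- ===== SOURCE B (Python) =====
-- def solution(N, A, B):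
--     seen = set()
--     for a, b in zip(A, B):
--         if abs(a - b) == 1:
--             seen.add(min(a, b))
--     for i in range(1, N):
--         if i not in seen:
--             return False
--     return True
-- ===== Notes on version B (the rewrite author's own statement) =====
-- stated objective: simpler
-- what changed: Instead of building a full min-keyed adjacency dict of lists and then doing a two-level dict/list lookup per i, B filters the edge stream once to the set of i that have an (i,i+1) edge and checks that this set covers 1..N-1 with a plain membership loop.
import Mathlib
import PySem

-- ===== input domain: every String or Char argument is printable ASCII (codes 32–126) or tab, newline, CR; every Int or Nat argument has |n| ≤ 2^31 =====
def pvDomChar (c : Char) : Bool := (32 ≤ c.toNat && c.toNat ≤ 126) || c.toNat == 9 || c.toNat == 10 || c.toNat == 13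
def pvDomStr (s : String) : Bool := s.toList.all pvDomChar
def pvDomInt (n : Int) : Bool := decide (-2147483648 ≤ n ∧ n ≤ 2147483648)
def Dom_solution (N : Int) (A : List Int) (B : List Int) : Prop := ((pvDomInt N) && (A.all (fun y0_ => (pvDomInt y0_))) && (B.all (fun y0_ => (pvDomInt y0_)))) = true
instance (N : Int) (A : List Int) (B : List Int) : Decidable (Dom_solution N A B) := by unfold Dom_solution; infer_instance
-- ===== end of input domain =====

-- B builds no adjacency dict: it filters the edge stream to the set of i having an (i,i+1) edge
-- and checks that this set covers 1..N-1 (objective: simpler).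

-- ===== PORT A =====
-- the dict-building loop of A: key = smaller endpoint, the larger is appended to its list
def solnBuild (pairs : List (Int × Int)) (g : PySem.Dict Int (List Int)) :
    PySem.Dict Int (List Int) :=
  pairs.foldl (fun g p =>
    let v1 := p.1; let v2 := p.2
    if v1 < v2 then
      if g.contains v1 then g.modify v1 [] (· ++ [v2]) else g.insert v1 [v2]
    else
      if g.contains v2 then g.modify v2 [] (· ++ [v1]) else g.insert v2 [v1]) g

-- the check loop of A with its early returns: 'for i in range(1, N)' as a fuel-counted count-up
def solnCheck (g : PySem.Dict Int (List Int)) (i : Int) : Nat → Bool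
  | 0 => true
  | n + 1 =>
    match g.get? i with
    | none => false
    | some l => if !(l.contains (i + 1)) then false else solnCheck g (i + 1) n

def solution (N : Int) (A : List Int) (B : List Int) : Bool :=
  let graph := solnBuild (A.zip B) PySem.Dict.empty
  solnCheck graph 1 (N - 1).toNat

-- ===== PORT B =====
-- B's coverage loop 'for i in range(1, N): if i not in seen: return False' as a count-up
def altCheck (seen : PySem.Set Int) (i : Int) : Nat → Bool
  | 0 => true
  | n + 1 => if !(PySem.Set.contains seen i) then false else altCheck seen (i + 1) n

def solution_alt (N : Int) (A : List Int) (B : List Int) : Bool :=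
  let seen : PySem.Set Int :=
    (A.zip B).foldl (fun s p =>
      if |p.1 - p.2| = 1 then PySem.Set.add s (min p.1 p.2) else s) PySem.Set.empty
  altCheck seen 1 (N - 1).toNat

-- ===== PRECONDITION & SPEC =====
def Spec_solution (N : Int) (A : List Int) (B : List Int) (out : Bool) : Prop := out = solution_alt N A B
instance (N : Int) (A : List Int) (B : List Int) (out : Bool) : Decidable (Spec_solution N A B out) := by unfold Spec_solution; infer_instance

-- ===== CLAIM (what is proved, stated in full; the proofs are below) =====
def Claim_equal_solution : Prop := ∀ (N : Int) (A : List Int) (B : List Int), Dom_solution N A B → Spec_solution N A B (solution N A B)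

-- ===== LEMMAS AND PROOFS =====

-- the value of the dict after one update of A's loop, seen through getD
lemma build_step_getD (g : PySem.Dict Int (List Int)) (k m i : Int) :
    (((if g.contains k then g.modify k [] (· ++ [m]) else g.insert k [m]).getD i [])) =
      (if i = k then g.getD k [] ++ [m] else g.getD i []) := by
  by_cases hc : g.contains k
  · simp [hc, PySem.Dict.getD_modify]
  · simp only [hc, Bool.false_eq_true, if_false, PySem.Dict.getD_insert]
    have h0 : g.getD k [] = [] :=
      PySem.Dict.getD_of_not_contains g ([] : List Int) (by simpa using hc)
    rw [h0]
    split <;> rfl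

-- loop invariant: at every point, "i+1 occurs in the dict's list at i" ↔ "i is in B's seen-set"
lemma build_invariant (pairs : List (Int × Int)) (g : PySem.Dict Int (List Int))
    (s : PySem.Set Int)
    (h : ∀ i, (i + 1) ∈ g.getD i [] ↔ i ∈ s) :
    ∀ i, (i + 1) ∈ (solnBuild pairs g).getD i [] ↔
      i ∈ pairs.foldl (fun s p =>
          if |p.1 - p.2| = 1 then PySem.Set.add s (min p.1 p.2) else s) s := by
  induction pairs generalizing g s with
  | nil => simpa [solnBuild] using h
  | cons p rest ih =>
    rcases p with ⟨a, b⟩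
    simp only [solnBuild, List.foldl_cons] at *
    refine ih _ _ ?_
    intro i
    by_cases hab : a < b
    · rw [if_pos hab, build_step_getD g a b i]
      have habs : |a - b| = 1 ↔ b = a + 1 := by rw [abs_sub_comm, abs_eq] <;> omega
      have hmin : min a b = a := min_eq_left hab.le
      by_cases hb1 : b = a + 1
      · rw [if_pos (habs.mpr hb1), hmin]
        by_cases hik : i = a
        · subst hik; simp [hb1, PySem.Set.mem_add]
        · simp [hik, PySem.Set.mem_add, h i]
      · rw [if_neg (fun hc => hb1 (habs.mp hc))]
        by_cases hik : i = a
        · subst hik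
          have hne : i + 1 ≠ b := fun hh => hb1 hh.symm
          simp [hne, h i]
        · simp [hik, h i]
    · rw [if_neg hab, build_step_getD g b a i]
      have habs : |a - b| = 1 ↔ a = b + 1 := by rw [abs_eq] <;> omega
      have hmin : min a b = b := min_eq_right (not_lt.mp hab)
      by_cases ha1 : a = b + 1
      · rw [if_pos (habs.mpr ha1), hmin]
        by_cases hik : i = b
        · subst hik; simp [ha1, PySem.Set.mem_add]
        · simp [hik, PySem.Set.mem_add, h i]
      · rw [if_neg (fun hc => ha1 (habs.mp hc))]
        by_cases hik : i = b
        · subst hik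
          have hne : i + 1 ≠ a := fun hh => ha1 hh.symm
          simp [hne, h i]
        · simp [hik, h i]

-- the two check loops agree step by step once the per-index tests agree
lemma check_eq (g : PySem.Dict Int (List Int)) (s : PySem.Set Int)
    (h : ∀ j, (g.getD j []).contains (j + 1) = PySem.Set.contains s j) :
    ∀ (n : Nat) (i : Int), solnCheck g i n = altCheck s i n := by
  intro n
  induction n with
  | zero => intro i; rfl
  | succ n ih =>
    intro i
    simp only [solnCheck, altCheck, ← h i]
    cases hg : g.get? i with
    | none =>
      rw [PySem.Dict.getD_of_get?_eq_none g ([] : List Int) hg]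
      simp
    | some lst =>
      rw [PySem.Dict.getD_of_get?_eq_some g ([] : List Int) hg, ih]

-- ===== VERDICT (by name: the statement is the Claim_ definition above) =====
theorem solution_spec : Claim_equal_solution := by
  intro N A B _
  unfold Spec_solution solution solution_alt
  refine check_eq _ _ (fun j => ?_) _ _
  have hmm := build_invariant (A.zip B) PySem.Dict.empty PySem.Set.empty
    (by intro j; simp [PySem.Dict.getD_empty, PySem.Set.empty]) j
  simp only [PySem.Set.contains_eq_listContains, List.contains_eq_mem]
  exact decide_eq_decide.mpr hmm
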